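-- pv_equiv track=rewrite | github.com/LUMIA-Group/distance_transformer | fairseq_cli/distance_prior.py | remove_bpe
-- ===== SOURCE A (Python) =====
-- def remove_bpe(word_list):
--     """
--
--     :param word_list: ['i', 'am', 'a', 'go@@', 'd', 'boy', '.']
--     :return:
--     """
--     new_list = []
--     bpe_info = []
--     tok = ""
--     bpe_count = 0
--     for item in word_list:
--         if item.endswith("@@"):
--             if tok == "":
--                 bpe_info.append([len(new_list), 0])
--             item_remove_bpe = item[:-2]
--             tok += item_remove_bpe
--             bpe_count += 1
--         else:
--             new_list.append(tok+item)
--             if len(tok) > 0: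
--                 bpe_count += 1
--                 bpe_info[-1][1] = bpe_count
--             bpe_count = 0
--             tok = ""
--     return new_list, bpe_info
-- ===== SOURCE B (Python) =====
-- def remove_bpe(word_list):
--     """
--
--     :param word_list: ['i', 'am', 'a', 'go@@', 'd', 'boy', '.']
--     :return:
--     """
--     new_list = []
--     bpe_info = []
--     i = 0
--     n = len(word_list)
--     while i < n:
--         # scan one "@@"-continued run, merging its pieces
--         j = i
--         merged = ""
--         while j < n and word_list[j].endswith("@@"):
--             if merged == "":
--                 bpe_info.append([len(new_list), 0])
--             merged += word_list[j][:-2]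
--             j += 1
--         if j == n:
--             break
--         if merged:
--             bpe_info[-1][1] = j - i + 1
--         new_list.append(merged + word_list[j])
--         i = j + 1
--     return new_list, bpe_info
-- ===== Notes on version B (the rewrite author's own statement) =====
-- stated objective: alternative
-- what changed: B replaces A's flat per-item state machine (persistent string accumulator tok and running bpe_count across iterations) by an outer loop over '@@'-continued runs with an inner scan: the merge buffer is run-local and the recorded span is derived from the run's index range (j - i + 1) instead of a maintained counter.
import Mathlib
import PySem

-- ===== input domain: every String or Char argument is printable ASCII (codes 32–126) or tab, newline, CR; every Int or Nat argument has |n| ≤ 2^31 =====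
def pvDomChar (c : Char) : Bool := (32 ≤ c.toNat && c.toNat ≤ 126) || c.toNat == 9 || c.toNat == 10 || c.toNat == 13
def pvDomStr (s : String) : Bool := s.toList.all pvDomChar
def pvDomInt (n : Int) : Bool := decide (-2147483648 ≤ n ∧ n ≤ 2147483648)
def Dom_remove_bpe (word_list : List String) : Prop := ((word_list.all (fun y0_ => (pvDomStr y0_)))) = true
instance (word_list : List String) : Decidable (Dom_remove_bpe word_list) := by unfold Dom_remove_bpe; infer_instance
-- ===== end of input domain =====

-- B replaces A's flat per-item state machine (persistent tok and bpe_count) by an outer loop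
-- over '@@'-continued runs with an inner scan: run-local merge buffer, span from the index range
-- (objective: alternative).

-- ===== PORT A =====
-- bpe_info[-1][1] = v  (no-op on [] is unreachable in A: tok ≠ "" implies an entry was appended)
def pyBackpatch (info : List (List Int)) (v : Int) : List (List Int) :=
  match info with
  | [] => []
  | [x] => [x.set 1 v]
  | x :: y :: xs => x :: pyBackpatch (y :: xs) v

def stepA (st : List String × List (List Int) × String × Int) (item : String) :
    List String × List (List Int) × String × Int :=
  match st with
  | (new_list, bpe_info, tok, bpe_count) =>
    if PySem.Str.endswith item "@@" then
      let bpe_info := if tok = "" then bpe_info ++ [[(new_list.length : Int), 0]] else bpe_info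
      let item_remove_bpe := PySem.Str.slice item none (some (-2))
      (new_list, bpe_info, tok ++ item_remove_bpe, bpe_count + 1)
    else
      let new_list := new_list ++ [tok ++ item]
      let bpe_info := if PySem.Str.len tok > 0 then pyBackpatch bpe_info (bpe_count + 1) else bpe_info
      (new_list, bpe_info, "", 0)

def remove_bpe (word_list : List String) : List String × List (List Int) :=
  let st := word_list.foldl stepA ([], [], "", 0)
  (st.1, st.2.1)

-- ===== PORT B =====
-- inner while of Source B: scan one "@@"-continued run, merging its pieces;
-- returns (merged, bpe_info so far, remaining items)
def bInner (pos : Nat) : List String → String → List (List Int) → String × List (List Int) × List String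
  | [], merged, acc => (merged, acc, [])
  | x :: t, merged, acc =>
    if PySem.Str.endswith x "@@" then
      let acc := if merged = "" then acc ++ [[(pos : Int), 0]] else acc
      bInner pos t (merged ++ PySem.Str.slice x none (some (-2))) acc
    else (merged, acc, x :: t)

theorem bInner_rest_len (pos : Nat) :
    ∀ (xs : List String) (merged : String) (acc : List (List Int)),
      (bInner pos xs merged acc).2.2.length ≤ xs.length := by
  intro xs
  induction xs with
  | nil => intro merged acc; simp [bInner]
  | cons x t ih =>
    intro merged acc
    by_cases hx : PySem.Str.endswith x "@@" = true
    · dsimp only [bInner]; rw [if_pos hx]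
      exact Nat.le_succ_of_le (ih _ _)
    · dsimp only [bInner]; rw [if_neg hx]

-- outer while of Source B: j - i + 1 is the number of consumed items plus one,
-- computed here from the list lengths
def bOuter : List String → List String → List (List Int) → List String × List (List Int)
  | [], nl, info => (nl, info)
  | x :: t, nl, info =>
    match hb : bInner nl.length (x :: t) "" info with
    | (_, info2, []) => (nl, info2)
    | (merged, info2, w :: rest) =>
      bOuter rest (nl ++ [merged ++ w])
        (if merged ≠ "" then
           pyBackpatch info2 (((x :: t).length - (w :: rest).length + 1 : Nat) : Int)
         else info2)
  termination_by xs _ _ => xs.length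
  decreasing_by
    have := bInner_rest_len nl.length (x :: t) "" info
    rw [hb] at this
    simp at this ⊢
    omega

def remove_bpe_alt (word_list : List String) : List String × List (List Int) :=
  bOuter word_list [] []

-- ===== PRECONDITION & SPEC =====
def Spec_remove_bpe (word_list : List String) (out : List String × List (List Int)) : Prop :=
  out = remove_bpe_alt word_list
instance (word_list : List String) (out : List String × List (List Int)) :
    Decidable (Spec_remove_bpe word_list out) := by unfold Spec_remove_bpe; infer_instance

-- ===== CLAIM (what is proved, stated in full; the proofs are below) =====
def Claim_equal_remove_bpe : Prop :=
  ∀ (word_list : List String), Dom_remove_bpe word_list →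
    Spec_remove_bpe word_list (remove_bpe word_list)

-- ===== LEMMAS AND PROOFS =====

theorem pyBackpatch_append (l : List (List Int)) (p : List Int) (v : Int) :
    pyBackpatch (l ++ [p]) v = l ++ [p.set 1 v] := by
  induction l with
  | nil => simp [pyBackpatch]
  | cons a l ih =>
    cases l with
    | nil => simp [pyBackpatch]
    | cons b l => simpa [pyBackpatch] using ih

theorem chars_join_nil_flatten (l : List (List Char)) :
    PySem.Chars.join [] l = l.flatten := by
  induction l with
  | nil => simp [PySem.Chars.join, List.intercalate]
  | cons a t ih =>
    cases t with
    | nil => simp [PySem.Chars.join, List.intercalate]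
    | cons b t =>
      simp only [PySem.Chars.join, List.intercalate] at ih ⊢
      simp [List.intersperse] at ih ⊢
      simpa using ih

theorem join_toList (group : List String) :
    (PySem.Str.join "" group).toList = (group.map String.toList).flatten := by
  rw [PySem.Str.toList_join]
  have : ("" : String).toList = [] := by decide
  rw [this, chars_join_nil_flatten]

theorem str_eq_empty_iff (s : String) : s = "" ↔ s.toList = [] := by
  rw [← String.toList_inj]; simp

-- step lemmas: the four branches of A's loop body
theorem stepA_bpe_new {item : String} (nl : List String) (info : List (List Int)) (cnt : Int)
    (h : PySem.Str.endswith item "@@" = true) :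
    stepA (nl, info, "", cnt) item =
      (nl, info ++ [[(nl.length : Int), 0]], "" ++ PySem.Str.slice item none (some (-2)), cnt + 1) := by
  dsimp only [stepA]; rw [if_pos h, if_pos rfl]

theorem stepA_bpe_cont {item tok : String} (nl : List String) (info : List (List Int)) (cnt : Int)
    (h : PySem.Str.endswith item "@@" = true) (ht : tok ≠ "") :
    stepA (nl, info, tok, cnt) item =
      (nl, info, tok ++ PySem.Str.slice item none (some (-2)), cnt + 1) := by
  dsimp only [stepA]; rw [if_pos h, if_neg ht]

theorem stepA_term_plain {item : String} (nl : List String) (info : List (List Int)) (cnt : Int)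
    (h : ¬ PySem.Str.endswith item "@@" = true) :
    stepA (nl, info, "", cnt) item = (nl ++ ["" ++ item], info, "", 0) := by
  dsimp only [stepA]
  rw [if_neg h, if_neg (by rw [PySem.Str.len_eq]; simp)]

theorem stepA_term_merge {item tok : String} (nl : List String) (info : List (List Int)) (cnt : Int)
    (h : ¬ PySem.Str.endswith item "@@" = true) (ht : tok ≠ "") :
    stepA (nl, info, tok, cnt) item =
      (nl ++ [tok ++ item], pyBackpatch info (cnt + 1), "", 0) := by
  dsimp only [stepA]
  rw [if_neg h, if_pos ?_]
  rw [PySem.Str.len_eq]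
  have h1 : tok.toList ≠ [] := fun hh => ht ((str_eq_empty_iff tok).mpr hh)
  have : tok.toList.length ≠ 0 := by simpa [List.length_eq_zero_iff] using h1
  omega

-- number of leading empty pieces of the pending run (bookkeeping for A's state)
def countEmpty : List String → Nat
  | [] => 0
  | p :: t => if p = "" then countEmpty t + 1 else 0

theorem countEmpty_le (q : List String) : countEmpty q ≤ q.length := by
  induction q with
  | nil => simp [countEmpty]
  | cons p t ih =>
    dsimp only [countEmpty]
    by_cases hp : p = ""
    · rw [if_pos hp]; simpa using ih
    · rw [if_neg hp]; simp

theorem countEmpty_eq_length_iff (q : List String) :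
    countEmpty q = q.length ↔ ∀ p ∈ q, p = "" := by
  induction q with
  | nil => simp [countEmpty]
  | cons p t ih =>
    dsimp only [countEmpty]
    by_cases hp : p = ""
    · rw [if_pos hp]; simp [hp, ih]
    · rw [if_neg hp]
      constructor
      · intro h; simp at h
      · intro h; exact absurd (h p (by simp)) hp

theorem join_eq_empty_iff (q : List String) :
    PySem.Str.join "" q = "" ↔ countEmpty q = q.length := by
  rw [str_eq_empty_iff, join_toList, List.flatten_eq_nil_iff, countEmpty_eq_length_iff]
  constructor
  · intro h p hp
    exact (str_eq_empty_iff p).mpr (h p.toList (by simpa using ⟨p, hp, rfl⟩))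
  · intro h l hl
    simp only [List.mem_map] at hl
    obtain ⟨p, hp, rfl⟩ := hl
    exact (str_eq_empty_iff p).mp (h p hp)

theorem join_append_single (q : List String) (p : String) :
    PySem.Str.join "" (q ++ [p]) = PySem.Str.join "" q ++ p := by
  rw [← String.toList_inj, String.toList_append, join_toList, join_toList]
  simp

theorem join_nil_empty : PySem.Str.join "" ([] : List String) = "" := by
  rw [str_eq_empty_iff, join_toList]; simp

theorem countEmpty_append (q : List String) (p : String) :
    countEmpty (q ++ [p]) =
      if countEmpty q = q.length then countEmpty q + (if p = "" then 1 else 0)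
      else countEmpty q := by
  induction q with
  | nil => simp [countEmpty]
  | cons a t ih =>
    rw [List.cons_append]
    by_cases ha : a = ""
    · simp only [countEmpty, if_pos ha, List.length_cons, ih]
      have hle := countEmpty_le t
      by_cases h2 : countEmpty t = t.length
      · rw [if_pos h2]
        rw [if_pos (show countEmpty t + 1 = t.length + 1 by omega)]
        split_ifs <;> omega
      · rw [if_neg h2]
        rw [if_neg (show ¬ countEmpty t + 1 = t.length + 1 by omega)]
    · simp only [countEmpty, if_neg ha, List.length_cons]
      rw [if_neg (show ¬ (0:Nat) = t.length + 1 by omega)]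

-- the canonical A-state after consuming the stripped pieces q of the current run
def entCnt (q : List String) : Nat := min (countEmpty q + 1) q.length

def stateOf (nl : List String) (info : List (List Int)) (q : List String) :
    List String × List (List Int) × String × Int :=
  (nl, info ++ List.replicate (entCnt q) [(nl.length : Int), 0],
   PySem.Str.join "" q, (q.length : Int))

-- A's bpe_info entries produced by one terminated run with stripped pieces q
def runEntries (pos : Nat) (q : List String) : List (List Int) :=
  if 0 < q.length then
    List.replicate (min (countEmpty q + 1) q.length - 1) [(pos : Int), 0] ++
      [[(pos : Int), if countEmpty q < q.length then (q.length : Int) + 1 else 0]]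
  else []

theorem stateOf_nil (nl : List String) (info : List (List Int)) :
    stateOf nl info [] = (nl, info, "", 0) := by
  simp [stateOf, entCnt, countEmpty, join_nil_empty]

-- how the pending-entry count and the pending entries evolve and resolve
theorem entCnt_append_of_empty {q : List String} (he : countEmpty q = q.length) (p : String) :
    entCnt (q ++ [p]) = q.length + 1 := by
  unfold entCnt
  rw [countEmpty_append, if_pos he, he]
  simp only [List.length_append, List.length_cons, List.length_nil]
  split_ifs <;> omega

theorem entCnt_append_of_ne {q : List String} (he : countEmpty q ≠ q.length) (p : String) :
    entCnt (q ++ [p]) = entCnt q := by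
  have hle := countEmpty_le q
  unfold entCnt
  rw [countEmpty_append, if_neg he]
  simp only [List.length_append, List.length_cons, List.length_nil]
  omega

theorem runEntries_of_join_empty (pos : Nat) {q : List String}
    (hj : PySem.Str.join "" q = "") :
    runEntries pos q = List.replicate (entCnt q) [(pos : Int), 0] := by
  have he : countEmpty q = q.length := (join_eq_empty_iff q).mp hj
  unfold runEntries entCnt
  by_cases hk : 0 < q.length
  · rw [if_pos hk, if_neg (by omega : ¬ countEmpty q < q.length)]
    rw [show min (countEmpty q + 1) q.length = (min (countEmpty q + 1) q.length - 1) + 1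
        by omega, List.replicate_succ']
    simp
  · rw [if_neg hk]
    have : q.length = 0 := by omega
    simp [this]

theorem runEntries_backpatch (pos : Nat) {q : List String}
    (hj : PySem.Str.join "" q ≠ "") (info : List (List Int)) :
    pyBackpatch (info ++ List.replicate (entCnt q) [(pos : Int), 0]) ((q.length : Int) + 1) =
      info ++ runEntries pos q := by
  have hle := countEmpty_le q
  have he : countEmpty q ≠ q.length := fun hh => hj ((join_eq_empty_iff q).mpr hh)
  have hk : 0 < q.length := by
    rcases Nat.eq_zero_or_pos q.length with h0 | h0
    · exact absurd (by omega) he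
    · exact h0
  have hre : runEntries pos q =
      List.replicate (entCnt q - 1) [(pos : Int), 0] ++ [[(pos : Int), (q.length : Int) + 1]] := by
    unfold runEntries entCnt
    rw [if_pos hk, if_pos (by omega)]
  have hm : entCnt q = (entCnt q - 1) + 1 := by unfold entCnt; omega
  rw [hre, hm, List.replicate_succ', ← List.append_assoc, ← List.append_assoc,
    pyBackpatch_append]
  rfl

theorem step_run {item : String} (h : PySem.Str.endswith item "@@" = true)
    (nl : List String) (info : List (List Int)) (q : List String) :
    stepA (stateOf nl info q) item =
      stateOf nl info (q ++ [PySem.Str.slice item none (some (-2))]) := by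
  by_cases hj : PySem.Str.join "" q = ""
  · have he : countEmpty q = q.length := (join_eq_empty_iff q).mp hj
    have hc : entCnt q = q.length := by
      have := countEmpty_le q
      unfold entCnt; omega
    unfold stateOf
    rw [hj, stepA_bpe_new nl _ _ h, join_append_single, hj,
      entCnt_append_of_empty he, hc, List.replicate_succ']
    simp
  · have he : countEmpty q ≠ q.length := fun hh => hj ((join_eq_empty_iff q).mpr hh)
    unfold stateOf
    rw [stepA_bpe_cont nl _ _ h hj, join_append_single, entCnt_append_of_ne he]
    simp

theorem step_term {w : String} (hw : ¬ PySem.Str.endswith w "@@" = true)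
    (nl : List String) (info : List (List Int)) (q : List String) :
    stepA (stateOf nl info q) w =
      (nl ++ [PySem.Str.join "" q ++ w], info ++ runEntries nl.length q, "", 0) := by
  by_cases hj : PySem.Str.join "" q = ""
  · unfold stateOf
    rw [hj, stepA_term_plain nl _ _ hw, runEntries_of_join_empty nl.length hj]
  · unfold stateOf
    rw [stepA_term_merge nl _ _ hw hj, runEntries_backpatch nl.length hj]

-- folding A's step over one whole run (takeWhile/dropWhile on the "@@" test)
theorem foldRun (xs : List String) :
    ∀ (nl : List String) (info : List (List Int)) (q : List String),
      List.foldl stepA (stateOf nl info q) xs =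
        List.foldl stepA
          (stateOf nl info
            (q ++ (xs.takeWhile (fun s => PySem.Str.endswith s "@@")).map
              (fun s => PySem.Str.slice s none (some (-2)))))
          (xs.dropWhile (fun s => PySem.Str.endswith s "@@")) := by
  induction xs with
  | nil => intro nl info q; simp
  | cons x t ih =>
    intro nl info q
    by_cases hx : PySem.Str.endswith x "@@" = true
    · have hx' : PySem.Chars.endswith x.toList ['@', '@'] = true := by simpa using hx
      rw [List.foldl_cons, step_run hx, ih]
      simp [hx']
    · have hx' : PySem.Chars.endswith x.toList ['@', '@'] = false := by
        simpa using Bool.eq_false_iff.mpr hx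
      simp [hx']

theorem dropWhile_head_not {xs : List String} {w : String} {rest : List String}
    (h : xs.dropWhile (fun s => PySem.Str.endswith s "@@") = w :: rest) :
    ¬ PySem.Str.endswith w "@@" = true := by
  have := List.head?_dropWhile_not (p := fun s => PySem.Str.endswith s "@@") (l := xs)
  rw [h] at this
  simp at this
  simp [this]

-- B's inner scan computes exactly the (tok, bpe_info) components of A's run state
theorem bInner_run (xs : List String) :
    ∀ (nl : List String) (info : List (List Int)) (q : List String),
      bInner nl.length xs (PySem.Str.join "" q)
        (info ++ List.replicate (entCnt q) [(nl.length : Int), 0]) =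
      (PySem.Str.join ""
         (q ++ (xs.takeWhile (fun s => PySem.Str.endswith s "@@")).map
           (fun s => PySem.Str.slice s none (some (-2)))),
       info ++ List.replicate
         (entCnt (q ++ (xs.takeWhile (fun s => PySem.Str.endswith s "@@")).map
           (fun s => PySem.Str.slice s none (some (-2))))) [(nl.length : Int), 0],
       xs.dropWhile (fun s => PySem.Str.endswith s "@@")) := by
  induction xs with
  | nil => intro nl info q; simp [bInner]
  | cons x t ih =>
    intro nl info q
    by_cases hx : PySem.Str.endswith x "@@" = true
    · have hx' : PySem.Chars.endswith x.toList ['@', '@'] = true := by simpa using hx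
      dsimp only [bInner]
      rw [if_pos hx]
      have hstep :
          (if PySem.Str.join "" q = ""
           then (info ++ List.replicate (entCnt q) [(nl.length : Int), 0]) ++ [[(nl.length : Int), 0]]
           else info ++ List.replicate (entCnt q) [(nl.length : Int), 0]) =
            info ++ List.replicate
              (entCnt (q ++ [PySem.Str.slice x none (some (-2))])) [(nl.length : Int), 0] := by
        by_cases hj : PySem.Str.join "" q = ""
        · have he : countEmpty q = q.length := (join_eq_empty_iff q).mp hj
          have hc : entCnt q = q.length := by
            have := countEmpty_le q
            unfold entCnt; omega
          rw [if_pos hj, entCnt_append_of_empty he, ← hc, List.replicate_succ']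
          simp
        · have he : countEmpty q ≠ q.length := fun hh => hj ((join_eq_empty_iff q).mpr hh)
          rw [if_neg hj, entCnt_append_of_ne he]
      rw [hstep, ← join_append_single]
      rw [ih nl info (q ++ [PySem.Str.slice x none (some (-2))])]
      simp [hx']
    · have hx' : PySem.Chars.endswith x.toList ['@', '@'] = false := by
        simpa using Bool.eq_false_iff.mpr hx
      dsimp only [bInner]
      rw [if_neg hx]
      simp [hx']

-- equation lemmas for bOuter's match on the bInner result
theorem bOuter_rest_nil {x : String} {t nl : List String} {info info2 : List (List Int)}
    {merged : String}
    (hb : bInner nl.length (x :: t) "" info = (merged, info2, [])) :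
    bOuter (x :: t) nl info = (nl, info2) := by
  rw [bOuter]
  split
  · rename_i heq
    rw [hb] at heq
    cases heq
    rfl
  · rename_i w rest heq
    rw [hb] at heq
    cases heq

theorem bOuter_rest_cons {x w : String} {t rest nl : List String}
    {info info2 : List (List Int)} {merged : String}
    (hb : bInner nl.length (x :: t) "" info = (merged, info2, w :: rest)) :
    bOuter (x :: t) nl info =
      bOuter rest (nl ++ [merged ++ w])
        (if merged ≠ "" then
           pyBackpatch info2 (((x :: t).length - (w :: rest).length + 1 : Nat) : Int)
         else info2) := by
  rw [bOuter]
  split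
  · rename_i heq
    rw [hb] at heq
    cases heq
  · rename_i w' rest' heq
    rw [hb] at heq
    cases heq
    rfl

-- main run-by-run induction: A's fold equals B's run loop
theorem bOuter_main (n : Nat) :
    ∀ (xs : List String), xs.length ≤ n →
      ∀ (nl : List String) (info : List (List Int)),
      ((List.foldl stepA (nl, info, "", 0) xs).1,
       (List.foldl stepA (nl, info, "", 0) xs).2.1) = bOuter xs nl info := by
  induction n with
  | zero =>
    intro xs hlen nl info
    have : xs = [] := List.length_eq_zero_iff.mp (by omega)
    subst this
    simp [bOuter]
  | succ n ih =>
    intro xs hlen nl info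
    cases xs with
    | nil => simp [bOuter]
    | cons x t =>
      have hfr := foldRun (x :: t) nl info []
      rw [stateOf_nil] at hfr
      simp only [List.nil_append] at hfr
      have hb := bInner_run (x :: t) nl info []
      rw [join_nil_empty] at hb
      simp only [List.nil_append,
        show entCnt ([] : List String) = 0 from by simp [entCnt, countEmpty],
        List.replicate_zero, List.append_nil] at hb
      set q := ((x :: t).takeWhile (fun s => PySem.Str.endswith s "@@")).map
        (fun s => PySem.Str.slice s none (some (-2))) with hqdef
      have hql : q.length = ((x :: t).takeWhile (fun s => PySem.Str.endswith s "@@")).length := by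
        rw [hqdef, List.length_map]
      cases hrest : (x :: t).dropWhile (fun s => PySem.Str.endswith s "@@") with
      | nil =>
        rw [hrest] at hfr hb
        rw [bOuter_rest_nil hb, hfr, List.foldl_nil]
        rfl
      | cons w rest =>
        rw [hrest] at hfr hb
        have hw := dropWhile_head_not hrest
        rw [bOuter_rest_cons hb, hfr, List.foldl_cons, step_term hw]
        have hlen2 : (x :: t).length = q.length + (w :: rest).length := by
          rw [hql, ← hrest]
          rw [← List.length_append, List.takeWhile_append_dropWhile]
        have hspan : (((x :: t).length - (w :: rest).length + 1 : Nat) : Int) =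
            (q.length : Int) + 1 := by
          rw [hlen2]
          push_cast
          omega
        have hentry :
            (if PySem.Str.join "" q ≠ "" then
               pyBackpatch (info ++ List.replicate (entCnt q) [(nl.length : Int), 0])
                 (((x :: t).length - (w :: rest).length + 1 : Nat) : Int)
             else info ++ List.replicate (entCnt q) [(nl.length : Int), 0]) =
            info ++ runEntries nl.length q := by
          by_cases hj : PySem.Str.join "" q = ""
          · rw [if_neg (by simpa using hj), runEntries_of_join_empty nl.length hj]
          · rw [if_pos hj, hspan, runEntries_backpatch nl.length hj]
        rw [hentry]
        apply ih
        have : rest.length < (x :: t).length := by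
          rw [hlen2]; simp; omega
        simp at hlen this ⊢
        omega

-- ===== VERDICT (by name: the statement is the Claim_ definition above) =====
theorem remove_bpe_spec : Claim_equal_remove_bpe := by
  intro word_list _
  unfold Spec_remove_bpe remove_bpe remove_bpe_alt
  exact bOuter_main word_list.length word_list (le_refl _) [] []
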